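-- pv_equiv track=rewrite | github.com/824zzy/Leetcode | HashTable/String/1156_Swap_For_Longest_Repeated_Character_Substring_L0.1.py | maxRepOpt1
-- ===== SOURCE A (Python) =====
-- from collections import Counter
-- from collections import Counter
--
-- def maxRepOpt1(text: str) -> int:
--     cnt = Counter(text)
--     ans = 0
--     for i in range(len(text)):
--         p = i+1
--         n = 1
--         curr = text[i]
--         while p<len(text) and text[p]==curr:
--             n += 1
--             p += 1
--         p += 1
--         while p<len(text) and text[p]==curr:
--             n += 1
--             p += 1
--
--         if cnt[curr]>1:
--             ans = max(ans, min(n+1, cnt[curr]))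
--         else:
--             ans = max(ans, min(n, cnt[curr]))
--     return ans
-- ===== SOURCE B (Python) =====
-- from collections import Counter
-- from itertools import groupby
--
--
-- def maxRepOpt1(text: str) -> int:
--     cnt = Counter(text)
--     runs = [(c, sum(1 for _ in g)) for c, g in groupby(text)]
--     ans = 0
--     for j, (c, l) in enumerate(runs):
--         if cnt[c] > 1:
--             extra = 0
--             if j + 2 < len(runs) and runs[j + 1][1] == 1 and runs[j + 2][0] == c:
--                 extra = runs[j + 2][1]
--             ans = max(ans, min(l + extra + 1, cnt[c]))
--         else:
--             ans = max(ans, 1)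
--     return ans
-- ===== Notes on version B (the rewrite author's own statement) =====
-- stated objective: faster
-- what changed: B replaces A's per-index double rescans (quadratic on long runs) by one run-length-encoding pass over the maximal runs, extending each run by one swapped-in char, merging two same-char runs across a length-1 gap, and capping by the char's total count.
import Mathlib
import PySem

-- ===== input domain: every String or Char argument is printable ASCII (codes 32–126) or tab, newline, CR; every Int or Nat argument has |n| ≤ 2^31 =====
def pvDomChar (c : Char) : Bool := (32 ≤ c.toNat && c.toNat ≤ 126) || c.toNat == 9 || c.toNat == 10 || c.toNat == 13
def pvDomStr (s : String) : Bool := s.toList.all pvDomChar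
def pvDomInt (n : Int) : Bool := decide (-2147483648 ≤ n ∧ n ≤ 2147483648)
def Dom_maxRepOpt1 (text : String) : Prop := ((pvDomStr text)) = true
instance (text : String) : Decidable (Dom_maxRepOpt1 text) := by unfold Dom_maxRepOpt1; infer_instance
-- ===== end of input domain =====

-- B replaces A's per-index rescans by one run-length-encoding pass (extend a run by one,
-- merge two same-char runs across a length-1 gap, cap by the char's total count); objective: faster.

-- ===== PORT A =====

-- one Python "while p < len(text) and text[p] == curr" loop: its number of iterations from index p
def aScan (cs : List Char) (c : Char) (p : Int) : Nat :=
  if h : 0 ≤ p ∧ p < (cs.length : Int) then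
    if PySem.List.pyGetD cs p 'a' = c then aScan cs c (p + 1) + 1 else 0
  else 0
termination_by ((cs.length : Int) - p).toNat
decreasing_by omega

def maxRepOpt1 (text : String) : Int :=
  let cs := text.toList
  let cnt := PySem.Dict.counter cs
  (PySem.List.pyRange 0 (cs.length : Int) 1).foldl (fun ans i =>
    let curr := PySem.List.pyGetD cs i 'a'
    let n1 : Int := 1 + (aScan cs curr (i + 1) : Int)          -- n after the first while loop
    let p1 : Int := i + 1 + (aScan cs curr (i + 1) : Int)      -- p after the first while loop
    let n : Int := n1 + (aScan cs curr (p1 + 1) : Int)         -- n after "p += 1" and the second while loop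
    let k := cnt.getD curr 0
    if k > 1 then max ans (min (n + 1) k) else max ans (min n k)) 0

-- ===== PORT B =====

-- itertools.groupby(text): the run-length encoding, one (char, length) pair per maximal run
def runsOf (cs : List Char) : List (Char × Nat) :=
  match cs with
  | [] => []
  | c :: rest =>
      (c, (rest.takeWhile (· == c)).length + 1) :: runsOf (rest.dropWhile (· == c))
termination_by cs.length
decreasing_by
  simp only [List.length_cons]
  exact Nat.lt_succ_of_le (List.length_dropWhile_le _ _)

-- B's lookahead "j+2 < len(runs) and runs[j+1][1] == 1 and runs[j+2][0] == c"; rest is runs[j+1:]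
def lookAhead (c : Char) (rest : List (Char × Nat)) : Nat :=
  match rest with
  | (_, 1) :: (c2, l2) :: _ => if c2 = c then l2 else 0
  | _ => 0

-- B's "for j, (c, l) in enumerate(runs)" loop; the list argument is runs[j:]
def bLoop (cnt : PySem.Dict Char Int) (runs : List (Char × Nat)) (ans : Int) : Int :=
  match runs with
  | [] => ans
  | (c, l) :: rest =>
      let k := cnt.getD c 0
      if k > 1 then bLoop cnt rest (max ans (min ((l : Int) + (lookAhead c rest : Int) + 1) k))
      else bLoop cnt rest (max ans 1)

def maxRepOpt1_alt (text : String) : Int :=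
  let cs := text.toList
  bLoop (PySem.Dict.counter cs) (runsOf cs) 0

-- ===== PRECONDITION & SPEC =====
def Spec_maxRepOpt1 (text : String) (out : Int) : Prop := out = maxRepOpt1_alt text
instance (text : String) (out : Int) : Decidable (Spec_maxRepOpt1 text out) := by unfold Spec_maxRepOpt1; infer_instance

-- ===== CLAIM (what is proved, stated in full; the proofs are below) =====
def Claim_equal_maxRepOpt1 : Prop := ∀ (text : String), Dom_maxRepOpt1 text → Spec_maxRepOpt1 text (maxRepOpt1 text)

-- ===== LEMMAS AND PROOFS =====

-- length of the initial run of c's in l (what each of A's while loops consumes)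
def twLen (l : List Char) (c : Char) : Nat := (l.takeWhile (· == c)).length


theorem aScan_eq_twLen (cs : List Char) (c : Char) (p : Int) (hp : 0 ≤ p) :
    aScan cs c p = twLen (cs.drop p.toNat) c := by
  rw [aScan]
  split_ifs with h hc
  · obtain ⟨-, h2⟩ := h
    have hlt : p.toNat < cs.length := by omega
    rw [PySem.List.pyGetD_eq_getElem cs 'a' hp (by exact_mod_cast h2)] at hc
    rw [aScan_eq_twLen cs c (p + 1) (by omega)]
    have ht : (p + 1).toNat = p.toNat + 1 := by omega
    rw [ht, ← List.getElem_cons_drop hlt]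
    simp only [twLen, List.takeWhile_cons, beq_iff_eq, if_pos hc, List.length_cons]
  · obtain ⟨-, h2⟩ := h
    have hlt : p.toNat < cs.length := by omega
    rw [PySem.List.pyGetD_eq_getElem cs 'a' hp (by exact_mod_cast h2)] at hc
    rw [← List.getElem_cons_drop hlt]
    simp only [twLen, List.takeWhile_cons, beq_iff_eq, if_neg hc, List.length_nil]
  · have hl : cs.length ≤ p.toNat := by omega
    rw [List.drop_eq_nil_of_le hl]
    simp [twLen]
termination_by ((cs.length : Int) - p).toNat
decreasing_by omega
def candS (cnt : Char → Int) : List Char → Int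
  | [] => 0
  | c :: rest =>
      let r : Nat := 1 + twLen rest c
      let e : Nat := twLen (rest.drop r) c
      let n : Int := (r : Int) + (e : Int)
      if cnt c > 1 then min (n + 1) (cnt c) else min n (cnt c)

def amax (cnt : Char → Int) : List Char → Int
  | [] => 0
  | c :: rest => max (candS cnt (c :: rest)) (amax cnt rest)

theorem amax_nonneg (cnt : Char → Int) (cs : List Char) : 0 ≤ amax cnt cs := by
  induction cs with
  | nil => simp [amax]
  | cons c rest ih => simp only [amax]; omega

theorem body_eq_candS (cs : List Char) (cnt : PySem.Dict Char Int) (k : Nat) (hk : k < cs.length) :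
    (let curr := PySem.List.pyGetD cs (k : Int) 'a'
     let n1 : Int := 1 + (aScan cs curr ((k : Int) + 1) : Int)
     let p1 : Int := (k : Int) + 1 + (aScan cs curr ((k : Int) + 1) : Int)
     let n : Int := n1 + (aScan cs curr (p1 + 1) : Int)
     let kk := cnt.getD curr 0
     if kk > 1 then min (n + 1) kk else min n kk) =
    candS (fun c => cnt.getD c 0) (cs.drop k) := by
  have hget : PySem.List.pyGetD cs (k : Int) 'a' = cs[k] := by
    rw [PySem.List.pyGetD_eq_getElem cs 'a' (by omega) (by exact_mod_cast hk)]
    congr 1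
  have h1 : aScan cs cs[k] ((k : Int) + 1) = twLen (cs.drop (k + 1)) cs[k] := by
    rw [aScan_eq_twLen cs cs[k] ((k : Int) + 1) (by omega)]
    congr 2
  have h2 : aScan cs cs[k] (((k : Int) + 1 + (twLen (cs.drop (k + 1)) cs[k] : Int)) + 1) =
      twLen (cs.drop (k + 1 + twLen (cs.drop (k + 1)) cs[k] + 1)) cs[k] := by
    rw [aScan_eq_twLen cs cs[k] _ (by positivity)]
    congr 2
  show (if cnt.getD (PySem.List.pyGetD cs (k : Int) 'a') 0 > 1 then _ else _) = _
  rw [hget, h1, h2, ← List.getElem_cons_drop hk]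
  show (if cnt.getD cs[k] 0 > 1 then
          min ((1 + (twLen (cs.drop (k + 1)) cs[k] : Int) +
                (twLen (cs.drop (k + 1 + twLen (cs.drop (k + 1)) cs[k] + 1)) cs[k] : Int)) + 1)
            (cnt.getD cs[k] 0)
        else
          min (1 + (twLen (cs.drop (k + 1)) cs[k] : Int) +
                (twLen (cs.drop (k + 1 + twLen (cs.drop (k + 1)) cs[k] + 1)) cs[k] : Int))
            (cnt.getD cs[k] 0)) = _
  simp only [candS]
  have hds : (cs.drop (k + 1)).drop (1 + twLen (cs.drop (k + 1)) cs[k]) =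
      cs.drop (k + 1 + twLen (cs.drop (k + 1)) cs[k] + 1) := by
    rw [List.drop_drop]
    congr 1
    omega
  rw [hds]
  split_ifs
  · push_cast; ring_nf
  · push_cast; ring_nf

theorem foldl_candS_eq_amax (cnt : Char → Int) (cs : List Char) (init : Int) (h0 : 0 ≤ init) :
    (List.range cs.length).foldl (fun a k => max a (candS cnt (cs.drop k))) init =
      max init (amax cnt cs) := by
  induction cs generalizing init with
  | nil => simp only [List.length_nil, List.range_zero, List.foldl_nil, amax]; omega
  | cons c rest ih =>
      rw [List.length_cons, List.range_succ_eq_map, List.foldl_cons, List.foldl_map]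
      simp only [List.drop_succ_cons, List.drop_zero]
      rw [ih (max init (candS cnt (c :: rest))) (by have := amax_nonneg cnt (c :: rest); omega)]
      simp only [amax]
      omega

theorem maxRepOpt1_eq_amax (text : String) :
    maxRepOpt1 text =
      amax (fun c => (PySem.Dict.counter text.toList).getD c 0) text.toList := by
  unfold maxRepOpt1
  dsimp only
  rw [PySem.List.pyRange_zero_nat, List.foldl_map]
  rw [PySem.List.foldl_congr_mem _ _
    (fun a k => max a (candS (fun c => (PySem.Dict.counter text.toList).getD c 0)
      (text.toList.drop k))) 0 ?_]
  · rw [foldl_candS_eq_amax _ _ 0 le_rfl]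
    have := amax_nonneg (fun c => (PySem.Dict.counter text.toList).getD c 0) text.toList
    omega
  · intro a k hk
    have hklt : k < text.toList.length := List.mem_range.mp hk
    have hb := body_eq_candS text.toList (PySem.Dict.counter text.toList) k hklt
    simp only at hb
    beta_reduce
    rw [← apply_ite (max a), hb]

def bmax (cnt : Char → Int) : List (Char × Nat) → Int
  | [] => 0
  | (c, l) :: rest =>
      max (if cnt c > 1 then min ((l : Int) + (lookAhead c rest : Int) + 1) (cnt c) else 1)
        (bmax cnt rest)

theorem bmax_nonneg (cnt : Char → Int) (rs : List (Char × Nat)) : 0 ≤ bmax cnt rs := by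
  induction rs with
  | nil => simp [bmax]
  | cons r rest ih => obtain ⟨c, l⟩ := r; simp only [bmax]; omega

theorem bLoop_eq_bmax (cnt : PySem.Dict Char Int) (rs : List (Char × Nat)) (ans : Int)
    (h0 : 0 ≤ ans) :
    bLoop cnt rs ans = max ans (bmax (fun c => cnt.getD c 0) rs) := by
  induction rs generalizing ans with
  | nil => simp only [bLoop, bmax]; omega
  | cons r rest ih =>
      obtain ⟨c, l⟩ := r
      simp only [bLoop, bmax]
      split_ifs with h
      · rw [ih _ (by omega)]
        omega
      · rw [ih _ (by omega)]
        omega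

theorem twLen_eq_zero (l : List Char) (c : Char) (h : ∀ d, l.head? = some d → d ≠ c) :
    twLen l c = 0 := by
  cases l with
  | nil => simp [twLen]
  | cons d t =>
      have hd : d ≠ c := h d rfl
      simp [twLen, hd]

theorem twLen_replicate_append (m : Nat) (c : Char) (w : List Char) :
    twLen (List.replicate m c ++ w) c = m + twLen w c := by
  induction m with
  | zero => simp
  | succ n ih =>
      rw [List.replicate_succ, List.cons_append]
      simp only [twLen, List.takeWhile_cons, beq_self_eq_true, if_true, List.length_cons] at *
      omega

theorem head_dropWhile_ne (rest : List Char) (c : Char) :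
    ∀ d, (rest.dropWhile (· == c)).head? = some d → d ≠ c := by
  intro d hd
  have := List.head?_dropWhile_not (p := (· == c)) (l := rest)
  rw [hd] at this
  simpa using this

theorem run_decomp (c : Char) (rest : List Char) :
    c :: rest = List.replicate (1 + twLen rest c) c ++ rest.dropWhile (· == c) := by
  have h1 : List.takeWhile (· == c) rest = List.replicate (twLen rest c) c := by
    exact List.eq_replicate_of_mem (fun b hb => by simpa using List.mem_takeWhile_imp hb)
  calc c :: rest = c :: (List.takeWhile (· == c) rest ++ List.dropWhile (· == c) rest) := by
        rw [List.takeWhile_append_dropWhile]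
    _ = List.replicate (1 + twLen rest c) c ++ rest.dropWhile (· == c) := by
        rw [h1, show 1 + twLen rest c = twLen rest c + 1 from by omega]
        rw [← List.cons_append, ← List.replicate_succ, List.replicate_succ', List.append_assoc,
          List.singleton_append]

theorem amax_run (cnt : Char → Int) (c : Char) (m : Nat) (hm : 1 ≤ m) (w : List Char)
    (hw : ∀ d, w.head? = some d → d ≠ c) :
    amax cnt (List.replicate m c ++ w) =
      max (if cnt c > 1 then min ((m : Int) + (twLen (w.drop 1) c : Int) + 1) (cnt c)
           else min ((m : Int) + (twLen (w.drop 1) c : Int)) (cnt c))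
        (amax cnt w) := by
  induction m with
  | zero => omega
  | succ n ih =>
      have hcand : candS cnt (c :: (List.replicate n c ++ w)) =
          (if cnt c > 1 then min (((n : Int) + 1) + (twLen (w.drop 1) c : Int) + 1) (cnt c)
           else min (((n : Int) + 1) + (twLen (w.drop 1) c : Int)) (cnt c)) := by
        simp only [candS]
        have htw : twLen (List.replicate n c ++ w) c = n := by
          rw [twLen_replicate_append, twLen_eq_zero w c hw]
          omega
        rw [htw]
        have hd2 : (List.replicate n c ++ w).drop (1 + n) = w.drop 1 := by
          rw [show 1 + n = n + 1 from by omega, ← List.drop_drop,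
            List.drop_left' (List.length_replicate ..)]
        rw [hd2]
        split_ifs <;> push_cast <;> ring_nf
      rw [List.replicate_succ, List.cons_append, amax, hcand]
      by_cases hn : 1 ≤ n
      · rw [ih hn]
        have hA := amax_nonneg cnt w
        split_ifs with h <;> push_cast <;> omega
      · have hn0 : n = 0 := by omega
        subst hn0
        simp only [List.replicate_zero, List.nil_append]
        push_cast
        ring_nf
theorem ext_eq_extra (c : Char) (w : List Char) (hw : ∀ d, w.head? = some d → d ≠ c) :
    twLen (w.drop 1) c = lookAhead c (runsOf w) := by
  cases w with
  | nil => simp [runsOf, lookAhead, twLen]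
  | cons d w' =>
      have hdc : d ≠ c := hw d rfl
      rw [runsOf]
      simp only [List.drop_succ_cons, List.drop_zero]
      rcases hn : (w'.takeWhile (· == d)).length with _ | m
      · -- gap run has length exactly 1
        have hw' : w'.dropWhile (· == d) = w' := by
          cases w' with
          | nil => simp
          | cons e t =>
              simp only [List.takeWhile_cons] at hn
              by_cases hed : (e == d) = true
              · simp [hed] at hn
              · simp [hed]
        rw [hw']
        cases w' with
        | nil => simp [runsOf, lookAhead, twLen]
        | cons e t =>
            rw [runsOf]
            by_cases hec : e = c
            · subst hec
              simp [lookAhead, twLen]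
            · have hb : (e == c) = false := by simp [hec]
              simp [lookAhead, twLen, hb, hec]
      · -- gap run has length ≥ 2
        have htw : twLen w' c = 0 := by
          cases w' with
          | nil => simp [twLen]
          | cons e t =>
              simp only [List.takeWhile_cons] at hn
              by_cases hed : (e == d) = true
              · have : e = d := by simpa using hed
                subst this
                simp [twLen, hdc]
              · simp [hed] at hn
        rw [htw]
        cases hrw : runsOf (w'.dropWhile (· == d)) with
        | nil => simp [lookAhead]
        | cons r t =>
            obtain ⟨c2, l2⟩ := r
            simp [lookAhead]

theorem amax_eq_bmax (cnt : Char → Int) (n : Nat) :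
    ∀ cs : List Char, cs.length ≤ n → (∀ x ∈ cs, 1 ≤ cnt x) →
      amax cnt cs = bmax cnt (runsOf cs) := by
  induction n with
  | zero =>
      intro cs hlen _
      have : cs = [] := List.length_eq_zero_iff.mp (by omega)
      subst this
      simp [amax, bmax, runsOf]
  | succ n ih =>
      intro cs hlen hcnt
      cases cs with
      | nil => simp [amax, bmax, runsOf]
      | cons c rest =>
          have hw := head_dropWhile_ne rest c
          have hdec := run_decomp c rest
          rw [runsOf, hdec, amax_run cnt c (1 + twLen rest c) (by omega) _ hw]
          have hsub : ∀ x ∈ rest.dropWhile (· == c), 1 ≤ cnt x := fun x hx =>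
            hcnt x (List.mem_cons_of_mem c ((List.dropWhile_sublist _).subset hx))
          have hlen' : (rest.dropWhile (· == c)).length ≤ n := by
            have := List.length_dropWhile_le (· == c) rest
            simp only [List.length_cons] at hlen
            omega
          rw [ih _ hlen' hsub]
          rw [bmax]
          rw [← ext_eq_extra c _ hw]
          have hk : 1 ≤ cnt c := hcnt c List.mem_cons_self
          have hB := bmax_nonneg cnt (runsOf (rest.dropWhile (· == c)))
          simp only [twLen]
          split_ifs with h <;> push_cast <;> omega

theorem maxRepOpt1_alt_eq_bmax (text : String) :
    maxRepOpt1_alt text =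
      bmax (fun c => (PySem.Dict.counter text.toList).getD c 0) (runsOf text.toList) := by
  unfold maxRepOpt1_alt
  rw [bLoop_eq_bmax _ _ 0 le_rfl]
  have := bmax_nonneg (fun c => (PySem.Dict.counter text.toList).getD c 0) (runsOf text.toList)
  omega

-- ===== VERDICT (by name: the statement is the Claim_ definition above) =====
theorem maxRepOpt1_spec : Claim_equal_maxRepOpt1 := by
  unfold Claim_equal_maxRepOpt1
  intro text _
  unfold Spec_maxRepOpt1
  rw [maxRepOpt1_eq_amax, maxRepOpt1_alt_eq_bmax]
  apply amax_eq_bmax _ text.toList.length _ le_rfl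
  intro x hx
  rw [PySem.Dict.getD_counter]
  have : 0 < text.toList.count x := List.count_pos_iff.mpr hx
  omega
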